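-- pv_equiv track=rewrite | github.com/AlamParihar/Cryptography-Challenges | Challenge Solutions/Set 1/set_1_2.py | b16_x
-- ===== SOURCE A (Python) =====
-- def bin2hex(_bin):
--     characters = ['0', '1', '2', '3', '4', '5', '6', '7', '8', '9', 'a', 'b', 'c', 'd', 'e', 'f']
--     dec = 0
--     for b in range(0, 4, 1):
--         bit = int(_bin[3 - b])
--         dec += (bit * (2 ** b))
--         hex_char = characters[dec]
--     return hex_char
--
-- def hex2bin(_hex):
--     var = int(_hex, 16)
--     byte_array = ""
--     r_byte_array = ""
--     for z in range(0, 4):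
--         _bit = int(var % 2)
--         var = int(var / 2)
--         r_byte_array += str(_bit)
--     byte_array = r_byte_array[::-1]
--     return byte_array
--
-- def bin_xor(_1, _2):
--     out_xor = ""
--     for i in range(0, len(_1)):
--         out_xor += str(int(_1[i]) ^ int(_2[i]))
--     return out_xor
--
-- def b16_x(_first, _second):
--     length = len(_first)
--     hex_xor = ''
--     for i in range(0, length):
--         or_1 = hex2bin(_first[i])
--         or_2 = hex2bin(_second[i])
--         x_or = bin_xor(or_1, or_2)
--         hex_xor += bin2hex(x_or)
--     return hex_xor
-- ===== SOURCE B (Python) =====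
-- def b16_x(_first, _second):
--     out = ''
--     for i in range(len(_first)):
--         out += '0123456789abcdef'[int(_first[i], 16) ^ int(_second[i], 16)]
--     return out
-- ===== Notes on version B (the rewrite author's own statement) =====
-- stated objective: simpler
-- what changed: Replaced the three helper functions (per-digit 4-bit decomposition, bitwise string XOR, binary-to-hex recomposition) with a single inline loop that XORs the two parsed hex digits as integers and indexes a hex-digit table.
import Mathlib
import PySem

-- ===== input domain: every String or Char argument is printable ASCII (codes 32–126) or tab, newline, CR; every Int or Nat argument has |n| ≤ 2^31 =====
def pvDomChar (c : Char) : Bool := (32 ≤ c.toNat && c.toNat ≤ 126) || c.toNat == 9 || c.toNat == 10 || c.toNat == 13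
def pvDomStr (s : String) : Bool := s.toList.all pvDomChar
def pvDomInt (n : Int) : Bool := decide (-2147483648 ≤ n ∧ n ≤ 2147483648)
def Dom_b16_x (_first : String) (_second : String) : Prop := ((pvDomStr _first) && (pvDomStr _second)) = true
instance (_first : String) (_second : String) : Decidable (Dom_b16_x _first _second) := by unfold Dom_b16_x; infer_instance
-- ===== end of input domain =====

-- B replaces A's three helper functions (per-digit 4-bit decomposition, bitwise
-- string XOR, binary-to-hex recomposition) by one inline loop that XORs the two
-- parsed hex digits as integers and indexes a hex-digit table (objective: simpler).

-- ===== PORT A =====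
-- bin2hex(_bin): dec accumulated over bits; hex_char reassigned each iteration,
-- the value after the last iteration is returned.  characters[dec] is ported with
-- pyGetD (dec ≤ 15 at every reachable call, so the default is never consulted).
def pvBin2hex (_bin : List Char) : Char :=
  let characters : List Char :=
    ['0','1','2','3','4','5','6','7','8','9','a','b','c','d','e','f']
  let st := (PySem.List.pyRange 0 4 1).foldl
    (fun (st : Int × Char) b =>
      let bit := (PySem.Int.ofChars? [PySem.List.pyGetD _bin (3 - b) '0']).getD 0
      let dec := st.1 + bit * 2 ^ b.toNat
      (dec, PySem.List.pyGetD characters dec '0'))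
    (0, '0')
  st.2

-- hex2bin(_hex): int(_hex, 16) ported with ofCharsBase?; Pre_ guarantees the parse
-- succeeds, so .getD 0 is never the ValueError case.  int(var / 2) is truncdiv.
def pvHex2bin (_hex : Char) : List Char :=
  let var := (PySem.Int.ofCharsBase? [_hex] 16).getD 0
  let st := (PySem.List.pyRange 0 4 1).foldl
    (fun (st : Int × List Char) _z =>
      let _bit := PySem.Int.mod st.1 2
      (PySem.Int.truncdiv st.1 2, st.2 ++ PySem.Int.toChars _bit))
    (var, [])
  st.2.reverse

-- bin_xor(_1, _2): both arguments are 4-bit strings here, indexing in range.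
def pvBinXor (_1 : List Char) (_2 : List Char) : List Char :=
  (PySem.List.pyRange 0 (_1.length : Int) 1).foldl
    (fun out_xor i =>
      out_xor ++ PySem.Int.toChars (PySem.Int.bxor
        ((PySem.Int.ofChars? [PySem.List.pyGetD _1 i '0']).getD 0)
        ((PySem.Int.ofChars? [PySem.List.pyGetD _2 i '0']).getD 0)))
    []

-- _second[i] raises IndexError when _second is shorter: excluded by Pre_.
def b16_x (_first : String) (_second : String) : String :=
  let fs := _first.toList
  let ss := _second.toList
  String.ofList ((PySem.List.pyRange 0 (fs.length : Int) 1).foldl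
    (fun hex_xor i =>
      let or_1 := pvHex2bin (PySem.List.pyGetD fs i ' ')
      let or_2 := pvHex2bin (PySem.List.pyGetD ss i ' ')
      let x_or := pvBinXor or_1 or_2
      hex_xor ++ [pvBin2hex x_or])
    [])

-- ===== PORT B =====
-- One loop: parse the two hex digits (Pre_ guarantees both parses and the index
-- into _second succeed), integer XOR, index the hex-digit table.
def b16_x_alt (_first : String) (_second : String) : String :=
  let fs := _first.toList
  let ss := _second.toList
  String.ofList ((PySem.List.pyRange 0 (fs.length : Int) 1).foldl
    (fun out i =>
      out ++ [PySem.List.pyGetD "0123456789abcdef".toList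
        (PySem.Int.bxor
          ((PySem.Int.ofCharsBase? [PySem.List.pyGetD fs i ' '] 16).getD 0)
          ((PySem.Int.ofCharsBase? [PySem.List.pyGetD ss i ' '] 16).getD 0)) '0'])
    [])

-- ===== PRECONDITION & SPEC =====
-- Pre_ excludes exactly the inputs where A raises: _second shorter than _first
-- (IndexError) or a non-hex character among the digits A reads (ValueError).
def Pre_b16_x (_first : String) (_second : String) : Prop :=
  _first.toList.length ≤ _second.toList.length ∧
  _first.toList.all (fun c => ['0','1','2','3','4','5','6','7','8','9','a','b','c','d','e','f','A','B','C','D','E','F'].contains c) = true ∧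
  (_second.toList.take _first.toList.length).all (fun c => ['0','1','2','3','4','5','6','7','8','9','a','b','c','d','e','f','A','B','C','D','E','F'].contains c) = true
instance (_first : String) (_second : String) : Decidable (Pre_b16_x _first _second) := by
  unfold Pre_b16_x; infer_instance

def pvWitness_b16_x : String × String := ("1a", "F2")

def Spec_b16_x (_first : String) (_second : String) (out : String) : Prop := out = b16_x_alt _first _second
instance (_first : String) (_second : String) (out : String) : Decidable (Spec_b16_x _first _second out) := by unfold Spec_b16_x; infer_instance

-- ===== CLAIM (what is proved, stated in full; the proofs are below) =====
def Claim_equal_b16_x : Prop := ∀ (_first : String) (_second : String), Dom_b16_x _first _second → Pre_b16_x _first _second → Spec_b16_x _first _second (b16_x _first _second)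

-- ===== LEMMAS AND PROOFS =====

-- per-digit agreement of the two pipelines, on all 22 hex-digit characters,
-- checked as one Boolean evaluation and then lifted to the Prop form
def pvAgree (c d : Char) : Bool :=
  pvBin2hex (pvBinXor (pvHex2bin c) (pvHex2bin d)) ==
    PySem.List.pyGetD "0123456789abcdef".toList
      (PySem.Int.bxor ((PySem.Int.ofCharsBase? [c] 16).getD 0)
        ((PySem.Int.ofCharsBase? [d] 16).getD 0)) '0'

set_option maxRecDepth 4000 in
theorem pv_all_agree :
    (['0','1','2','3','4','5','6','7','8','9','a','b','c','d','e','f','A','B','C','D','E','F'].all fun c =>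
      ['0','1','2','3','4','5','6','7','8','9','a','b','c','d','e','f','A','B','C','D','E','F'].all fun d => pvAgree c d) = true := by decide

theorem pv_char_agree :
    ∀ c ∈ ['0','1','2','3','4','5','6','7','8','9','a','b','c','d','e','f','A','B','C','D','E','F'], ∀ d ∈ ['0','1','2','3','4','5','6','7','8','9','a','b','c','d','e','f','A','B','C','D','E','F'],
      pvBin2hex (pvBinXor (pvHex2bin c) (pvHex2bin d)) =
      PySem.List.pyGetD "0123456789abcdef".toList
        (PySem.Int.bxor ((PySem.Int.ofCharsBase? [c] 16).getD 0)
          ((PySem.Int.ofCharsBase? [d] 16).getD 0)) '0' := by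
  intro c hc d hd
  have h := pv_all_agree
  rw [List.all_eq_true] at h
  have h2 := h c hc
  rw [List.all_eq_true] at h2
  exact eq_of_beq (h2 d hd)

theorem b16_x_eq (f s : List Char)
    (hlen : f.length ≤ s.length)
    (hf : f.all (fun c => ['0','1','2','3','4','5','6','7','8','9','a','b','c','d','e','f','A','B','C','D','E','F'].contains c) = true)
    (hs : (s.take f.length).all (fun c => ['0','1','2','3','4','5','6','7','8','9','a','b','c','d','e','f','A','B','C','D','E','F'].contains c) = true) :
    ((PySem.List.pyRange 0 (f.length : Int) 1).foldl
      (fun hex_xor i =>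
        hex_xor ++ [pvBin2hex (pvBinXor (pvHex2bin (PySem.List.pyGetD f i ' '))
                                        (pvHex2bin (PySem.List.pyGetD s i ' ')))]) []) =
    ((PySem.List.pyRange 0 (f.length : Int) 1).foldl
      (fun out i =>
        out ++ [PySem.List.pyGetD "0123456789abcdef".toList
          (PySem.Int.bxor
            ((PySem.Int.ofCharsBase? [PySem.List.pyGetD f i ' '] 16).getD 0)
            ((PySem.Int.ofCharsBase? [PySem.List.pyGetD s i ' '] 16).getD 0)) '0']) []) := by
  rw [PySem.List.foldl_append_singleton_eq_map, PySem.List.foldl_append_singleton_eq_map]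
  refine congrArg _ (List.map_congr_left ?_)
  intro i hi
  rw [PySem.List.mem_pyRange_one] at hi
  obtain ⟨h0, hlt⟩ := hi
  have hif : i.toNat < f.length := by omega
  have his : i.toNat < s.length := by omega
  rw [PySem.List.pyGetD_eq_getElem f ' ' h0 hlt,
      PySem.List.pyGetD_eq_getElem s ' ' h0 (by exact_mod_cast by omega)]
  rw [List.all_eq_true] at hf hs
  refine pv_char_agree _ ?_ _ ?_
  · exact List.contains_iff_mem.mp (hf _ (List.getElem_mem hif))
  · refine List.contains_iff_mem.mp (hs _ ?_)
    have : (s.take f.length)[i.toNat]'(by simp; omega) = s[i.toNat] := List.getElem_take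
    exact this ▸ List.getElem_mem _

-- ===== VERDICT (by name: the statement is the Claim_ definition above) =====
theorem b16_x_spec : Claim_equal_b16_x := by
  intro f s _ hpre
  obtain ⟨hlen, hf, hs⟩ := hpre
  unfold Spec_b16_x b16_x b16_x_alt
  exact congrArg String.ofList (b16_x_eq f.toList s.toList hlen hf hs)
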